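-- pv_equiv track=rewrite | github.com/noho/dayu-agent | dayu/wechat/service_manager.py | _parse_systemd_unit_runtime_fields
-- ===== SOURCE A (Python) =====
-- def _parse_systemd_unit_runtime_fields(raw_unit_text: str) -> tuple[str | None, str | None]:
--     """从 systemd unit 文本中提取运行时字段。"""
--
--     working_directory: str | None = None
--     exec_start: str | None = None
--     for raw_line in raw_unit_text.splitlines():
--         line = raw_line.strip()
--         if not line or line.startswith("#"):
--             continue
--         if line.startswith("WorkingDirectory="):
--             working_directory = line.removeprefix("WorkingDirectory=").strip() or None
--             continue
--         if line.startswith("ExecStart="):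
--             exec_start = line.removeprefix("ExecStart=").strip() or None
--     return working_directory, exec_start
-- ===== SOURCE B (Python) =====
-- def _parse_systemd_unit_runtime_fields(raw_unit_text: str) -> tuple[str | None, str | None]:
--     """Generic key=value scan into a dict (last occurrence wins), then two lookups."""
--     fields = {}
--     for raw_line in raw_unit_text.splitlines():
--         line = raw_line.strip()
--         if not line or line.startswith("#"):
--             continue
--         idx = line.find("=")
--         if idx == -1:
--             continue
--         fields[line[:idx]] = line[idx + 1:].strip()
--     return fields.get("WorkingDirectory") or None, fields.get("ExecStart") or None
-- ===== Notes on version B (the rewrite author's own statement) =====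
-- stated objective: idiomatic
-- what changed: Replaces the two hard-coded prefix branches by a generic key=value scan that builds a dict of all fields (split at the first equals sign, last occurrence wins) followed by two lookups that map an empty or missing value to None.
import Mathlib
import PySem

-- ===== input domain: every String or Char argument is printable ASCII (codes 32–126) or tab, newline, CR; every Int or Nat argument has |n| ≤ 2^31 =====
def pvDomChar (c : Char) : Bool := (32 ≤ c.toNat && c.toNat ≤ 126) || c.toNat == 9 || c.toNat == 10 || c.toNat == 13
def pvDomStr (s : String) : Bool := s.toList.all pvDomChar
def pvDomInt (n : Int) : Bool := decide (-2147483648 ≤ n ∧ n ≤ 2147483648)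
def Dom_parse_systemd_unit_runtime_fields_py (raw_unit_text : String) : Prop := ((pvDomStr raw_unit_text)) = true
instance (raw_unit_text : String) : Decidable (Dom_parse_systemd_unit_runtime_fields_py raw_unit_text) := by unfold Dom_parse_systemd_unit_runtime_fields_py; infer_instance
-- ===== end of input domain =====

-- B replaces A's two hard-coded prefix branches by a generic key=value scan into a dict plus
-- two lookups (idiomatic); return values proved equal on all inputs.

-- ===== PORT A =====
-- One iteration of A's loop; 'line.removeprefix(p)' after a successful startswith check is
-- exactly 'drop p.length' (17 / 10) — exact here.
def pvA_step (st : Option String × Option String) (rawLine : String) :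
    Option String × Option String :=
  let line := PySem.Chars.strip rawLine.toList
  if line = [] then st
  else if PySem.Chars.startswith line "#".toList then st
  else if PySem.Chars.startswith line "WorkingDirectory=".toList then
    let v := PySem.Chars.strip (line.drop 17)
    (if v = [] then none else some (String.ofList v), st.2)
  else if PySem.Chars.startswith line "ExecStart=".toList then
    let v := PySem.Chars.strip (line.drop 10)
    (st.1, if v = [] then none else some (String.ofList v))
  else st

def parse_systemd_unit_runtime_fields_py (raw_unit_text : String) :
    Option String × Option String :=
  (PySem.Str.splitlines raw_unit_text).foldl pvA_step (none, none)

-- ===== PORT B =====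
-- Python 'x or None' on str | None: empty string and None both give None.
def pvOrNone (o : Option String) : Option String :=
  match o with
  | some v => if v = "" then none else some v
  | none => none

-- One iteration of B's loop: store line[:idx] ↦ line[idx+1:].strip() (slices via PySem.Chars.slice).
def pvB_step (d : PySem.Dict String String) (rawLine : String) : PySem.Dict String String :=
  let line := PySem.Chars.strip rawLine.toList
  if line = [] then d
  else if PySem.Chars.startswith line "#".toList then d
  else
    let idx := PySem.Chars.find line "=".toList
    if idx = -1 then d
    else d.insert (String.ofList (PySem.Chars.slice line none (some idx)))
                  (String.ofList (PySem.Chars.strip (PySem.Chars.slice line (some (idx + 1)) none)))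

def parse_systemd_unit_runtime_fields_py_alt (raw_unit_text : String) :
    Option String × Option String :=
  let fields := (PySem.Str.splitlines raw_unit_text).foldl pvB_step PySem.Dict.empty
  (pvOrNone (fields.get? "WorkingDirectory"), pvOrNone (fields.get? "ExecStart"))

-- ===== PRECONDITION & SPEC =====
def Spec_parse_systemd_unit_runtime_fields_py (raw_unit_text : String)
    (out : Option String × Option String) : Prop :=
  out = parse_systemd_unit_runtime_fields_py_alt raw_unit_text
instance (raw_unit_text : String) (out : Option String × Option String) :
    Decidable (Spec_parse_systemd_unit_runtime_fields_py raw_unit_text out) := by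
  unfold Spec_parse_systemd_unit_runtime_fields_py; infer_instance

-- ===== CLAIM =====
def Claim_equal_parse_systemd_unit_runtime_fields_py : Prop :=
  ∀ (raw_unit_text : String), Dom_parse_systemd_unit_runtime_fields_py raw_unit_text →
    Spec_parse_systemd_unit_runtime_fields_py raw_unit_text
      (parse_systemd_unit_runtime_fields_py raw_unit_text)

-- ===== LEMMAS AND PROOFS =====

theorem pv_singleton_prefix (c : Char) (t : List Char) : [c] <+: t ↔ t.head? = some c := by
  cases t with
  | nil => simp
  | cons x xs => simp [List.cons_prefix_cons, eq_comm]

-- First-occurrence characterisation of find for the one-character needle '='.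
theorem pv_find_spec (l : List Char) (h : PySem.Chars.find l ['='] ≠ -1) :
    0 ≤ PySem.Chars.find l ['='] ∧ l[(PySem.Chars.find l ['=']).toNat]? = some '=' ∧
      ∀ i : Nat, i < (PySem.Chars.find l ['=']).toNat → l[i]? ≠ some '=' := by
  have h0 : PySem.Chars.findFrom l ['='] ((0 : Nat) : Int) = PySem.Chars.find l ['='] := by
    simp
  obtain ⟨h1, h2, h3⟩ :=
    PySem.Chars.findFrom_natCast_spec l ['='] 0 (Nat.zero_le _) (by rw [h0]; exact h)
  rw [h0] at h1 h2 h3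
  refine ⟨by exact_mod_cast h1, ?_, ?_⟩
  · have := (pv_singleton_prefix '=' _).mp h2
    simpa [List.head?_drop] using this
  · intro i hi hc
    exact h3 i (Nat.zero_le _) hi
      ((pv_singleton_prefix '=' _).mpr (by simpa [List.head?_drop] using hc))

-- A stripped line startswith "<k>=" iff the first '=' sits at index |k| and the part before it is k.
theorem pv_key_iff (k l : List Char) (hk : '=' ∉ k) :
    (k ++ ['=']) <+: l ↔
      (PySem.Chars.find l ['='] = (k.length : Int) ∧ l.take k.length = k) := by
  constructor
  · rintro ⟨t, ht⟩
    have hl : l = k ++ '=' :: t := by simpa using ht.symm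
    subst hl
    have hne : PySem.Chars.find (k ++ '=' :: t) ['='] ≠ -1 := by
      rw [PySem.Chars.find_ne_neg_one_iff]
      exact ⟨k, t, by simp⟩
    obtain ⟨h0, hat, hmin⟩ := pv_find_spec _ hne
    have hkpos : (k ++ '=' :: t)[k.length]? = some '=' := by simp
    have hle : (PySem.Chars.find (k ++ '=' :: t) ['=']).toNat ≤ k.length := by
      by_contra hlt
      exact hmin k.length (by omega) hkpos
    have hge : ¬ (PySem.Chars.find (k ++ '=' :: t) ['=']).toNat < k.length := by
      intro hlt
      have : (k ++ '=' :: t)[(PySem.Chars.find (k ++ '=' :: t) ['=']).toNat]? =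
          k[(PySem.Chars.find (k ++ '=' :: t) ['=']).toNat]? := by
        rw [List.getElem?_append_left hlt]
      rw [this] at hat
      exact hk (List.mem_of_getElem? hat)
    have heq : (PySem.Chars.find (k ++ '=' :: t) ['=']).toNat = k.length := by omega
    refine ⟨by omega, by simp⟩
  · rintro ⟨hf, ht⟩
    have hne : PySem.Chars.find l ['='] ≠ -1 := by rw [hf]; omega
    obtain ⟨h0, hat, -⟩ := pv_find_spec l hne
    have htn : (PySem.Chars.find l ['=']).toNat = k.length := by omega
    rw [htn] at hat
    have hlen : k.length < l.length := by
      by_contra hge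
      rw [List.getElem?_eq_none (by omega)] at hat
      simp at hat
    refine ⟨l.drop (k.length + 1), ?_⟩
    conv_rhs => rw [← List.take_append_drop k.length l]
    rw [ht]
    have hdrop : l.drop k.length = '=' :: l.drop (k.length + 1) := by
      rw [List.drop_eq_getElem_cons hlen]
      have : l[k.length] = '=' := by
        have := hat
        rw [List.getElem?_eq_getElem hlen] at this
        exact Option.some.inj this
      simp [this]
    rw [hdrop]
    simp

-- ofList is injective on the list side.
theorem pv_ofList_eq_empty (w : List Char) : String.ofList w = "" ↔ w = [] := by
  constructor
  · intro h; have := congrArg String.toList h; simpa using this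
  · intro h; simp [h]

theorem pv_orNone_ofList (w : List Char) :
    pvOrNone (some (String.ofList w)) = if w = [] then none else some (String.ofList w) := by
  simp only [pvOrNone, pv_ofList_eq_empty]

theorem pv_ofList_inj {a b : List Char} (h : String.ofList a = String.ofList b) : a = b := by
  have := congrArg String.toList h; simpa using this

-- One loop iteration preserves the relation between A's pair and B's dict.
theorem pv_step (st : Option String × Option String) (d : PySem.Dict String String)
    (h1 : st.1 = pvOrNone (d.get? "WorkingDirectory"))
    (h2 : st.2 = pvOrNone (d.get? "ExecStart")) (rawLine : String) :
    (pvA_step st rawLine).1 = pvOrNone ((pvB_step d rawLine).get? "WorkingDirectory") ∧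
    (pvA_step st rawLine).2 = pvOrNone ((pvB_step d rawLine).get? "ExecStart") := by
  unfold pvA_step pvB_step
  set l := PySem.Chars.strip rawLine.toList with hldef
  have heqT : ("=".toList) = ['='] := rfl
  by_cases hnil : l = []
  · rw [if_pos hnil, if_pos hnil]; exact ⟨h1, h2⟩
  rw [if_neg hnil, if_neg hnil]
  by_cases hsh : PySem.Chars.startswith l "#".toList = true
  · rw [if_pos hsh, if_pos hsh]; exact ⟨h1, h2⟩
  rw [if_neg hsh, if_neg hsh, heqT]
  have hW16 : ("WorkingDirectory=".toList) = "WorkingDirectory".toList ++ ['='] := by decide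
  have hE10 : ("ExecStart=".toList) = "ExecStart".toList ++ ['='] := by decide
  have hkW : ('=') ∉ "WorkingDirectory".toList := by decide
  have hkE : ('=') ∉ "ExecStart".toList := by decide
  by_cases hW : ("WorkingDirectory".toList ++ ['=']) <+: l
  · obtain ⟨hf, ht⟩ := (pv_key_iff _ l hkW).mp hW
    have hf16 : PySem.Chars.find l ['='] = (16 : Int) := by
      rw [hf]; decide
    have ht16 : l.take 16 = "WorkingDirectory".toList := by
      rwa [(by decide : ("WorkingDirectory".toList).length = 16)] at ht
    have hsw : PySem.Chars.startswith l "WorkingDirectory=".toList = true := by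
      rw [hW16, PySem.Chars.startswith_iff]; exact hW
    rw [if_pos hsw, hf16, if_neg (by decide : ¬ (16:Int) = -1)]
    rw [PySem.Chars.slice_eq_listSlice, PySem.Chars.slice_eq_listSlice,
        PySem.List.slice_to l (by decide : (0:Int) ≤ 16),
        PySem.List.slice_from l (by decide : (0:Int) ≤ 16 + 1)]
    rw [(by decide : ((16:Int)).toNat = 16), (by decide : ((16:Int) + 1).toNat = 17), ht16]
    rw [(by decide : String.ofList "WorkingDirectory".toList = "WorkingDirectory")]
    refine ⟨?_, ?_⟩
    · rw [PySem.Dict.get?_insert_self, pv_orNone_ofList]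
    · rw [PySem.Dict.get?_insert_of_ne _ _
        (by decide : ("ExecStart" : String) ≠ "WorkingDirectory")]
      exact h2
  by_cases hE : ("ExecStart".toList ++ ['=']) <+: l
  · obtain ⟨hf, ht⟩ := (pv_key_iff _ l hkE).mp hE
    have hf9 : PySem.Chars.find l ['='] = (9 : Int) := by rw [hf]; decide
    have ht9 : l.take 9 = "ExecStart".toList := by
      rwa [(by decide : ("ExecStart".toList).length = 9)] at ht
    have hsw : PySem.Chars.startswith l "ExecStart=".toList = true := by
      rw [hE10, PySem.Chars.startswith_iff]; exact hE
    have hnsw : ¬ PySem.Chars.startswith l "WorkingDirectory=".toList = true := by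
      rw [hW16, PySem.Chars.startswith_iff]; exact hW
    rw [if_neg hnsw, if_pos hsw, hf9, if_neg (by decide : ¬ (9:Int) = -1)]
    rw [PySem.Chars.slice_eq_listSlice, PySem.Chars.slice_eq_listSlice,
        PySem.List.slice_to l (by decide : (0:Int) ≤ 9),
        PySem.List.slice_from l (by decide : (0:Int) ≤ 9 + 1)]
    rw [(by decide : ((9:Int)).toNat = 9), (by decide : ((9:Int) + 1).toNat = 10), ht9]
    rw [(by decide : String.ofList "ExecStart".toList = "ExecStart")]
    refine ⟨?_, ?_⟩
    · rw [PySem.Dict.get?_insert_of_ne _ _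
        (by decide : ("WorkingDirectory" : String) ≠ "ExecStart")]
      exact h1
    · rw [PySem.Dict.get?_insert_self, pv_orNone_ofList]
  · -- neither key: A keeps its state; B's insert (if any) is under a different key
    have hnswW : ¬ PySem.Chars.startswith l "WorkingDirectory=".toList = true := by
      rw [hW16, PySem.Chars.startswith_iff]; exact hW
    have hnswE : ¬ PySem.Chars.startswith l "ExecStart=".toList = true := by
      rw [hE10, PySem.Chars.startswith_iff]; exact hE
    rw [if_neg hnswW, if_neg hnswE]
    by_cases hfe : PySem.Chars.find l ['='] = -1
    · rw [if_pos hfe]; exact ⟨h1, h2⟩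
    · rw [if_neg hfe]
      obtain ⟨h0, hat, -⟩ := pv_find_spec l hfe
      have hflen : (PySem.Chars.find l ['=']).toNat < l.length := by
        by_contra hge
        rw [List.getElem?_eq_none (by omega)] at hat
        simp at hat
      rw [PySem.Chars.slice_eq_listSlice, PySem.Chars.slice_eq_listSlice,
          PySem.List.slice_to l h0,
          PySem.List.slice_from l (by omega : (0:Int) ≤ PySem.Chars.find l ['='] + 1)]
      have hkeyW : String.ofList (l.take (PySem.Chars.find l ['=']).toNat) ≠ "WorkingDirectory" := by
        intro hc
        have htk : l.take (PySem.Chars.find l ['=']).toNat = "WorkingDirectory".toList :=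
          pv_ofList_inj (by rw [hc]; decide)
        have hlen16 : (PySem.Chars.find l ['=']).toNat = 16 := by
          have := congrArg List.length htk
          simp at this
          omega
        exact hW ((pv_key_iff _ l hkW).mpr
          ⟨by rw [(by decide : (("WorkingDirectory".toList).length : Int) = 16)]; omega,
           by rw [(by decide : ("WorkingDirectory".toList).length = 16), ← hlen16]; exact htk⟩)
      have hkeyE : String.ofList (l.take (PySem.Chars.find l ['=']).toNat) ≠ "ExecStart" := by
        intro hc
        have htk : l.take (PySem.Chars.find l ['=']).toNat = "ExecStart".toList :=
          pv_ofList_inj (by rw [hc]; decide)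
        have hlen9 : (PySem.Chars.find l ['=']).toNat = 9 := by
          have := congrArg List.length htk
          simp at this
          omega
        exact hE ((pv_key_iff _ l hkE).mpr
          ⟨by rw [(by decide : (("ExecStart".toList).length : Int) = 9)]; omega,
           by rw [(by decide : ("ExecStart".toList).length = 9), ← hlen9]; exact htk⟩)
      refine ⟨?_, ?_⟩
      · rw [PySem.Dict.get?_insert_of_ne _ _ (fun h => hkeyW h.symm)]
        exact h1
      · rw [PySem.Dict.get?_insert_of_ne _ _ (fun h => hkeyE h.symm)]
        exact h2

-- The whole loops preserve the relation.
theorem pv_fold (lines : List String) (st : Option String × Option String)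
    (d : PySem.Dict String String)
    (h1 : st.1 = pvOrNone (d.get? "WorkingDirectory"))
    (h2 : st.2 = pvOrNone (d.get? "ExecStart")) :
    (lines.foldl pvA_step st).1 = pvOrNone ((lines.foldl pvB_step d).get? "WorkingDirectory") ∧
    (lines.foldl pvA_step st).2 = pvOrNone ((lines.foldl pvB_step d).get? "ExecStart") := by
  induction lines generalizing st d with
  | nil => exact ⟨h1, h2⟩
  | cons x xs ih =>
    exact ih (pvA_step st x) (pvB_step d x) (pv_step st d h1 h2 x).1 (pv_step st d h1 h2 x).2

-- ===== VERDICT =====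
theorem parse_systemd_unit_runtime_fields_py_spec :
    Claim_equal_parse_systemd_unit_runtime_fields_py := by
  intro raw _
  unfold Spec_parse_systemd_unit_runtime_fields_py
  unfold parse_systemd_unit_runtime_fields_py parse_systemd_unit_runtime_fields_py_alt
  obtain ⟨hl, hr⟩ := pv_fold (PySem.Str.splitlines raw) (none, none) PySem.Dict.empty rfl rfl
  exact Prod.ext hl hr
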